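-- pv_equiv track=rewrite | github.com/yruefenacht/advent-of-code-2019 | day04.py | has_double_strict
-- ===== SOURCE A (Python) =====
-- def has_double_strict(string, count):
--     for i in string:
--         c = 0
--         for j in string:
--             if i == j:
--                 c += 1
--         if c == count:
--             return True
--     return False
-- ===== SOURCE B (Python) =====
-- def has_double_strict(string, count):
--     freq = {}
--     for ch in string:
--         freq[ch] = freq.get(ch, 0) + 1
--     return count in freq.values()
-- ===== Notes on version B (the rewrite author's own statement) =====
-- stated objective: faster
-- what changed: Replaces the quadratic nested rescans (re-counting the whole string for every character) with a single-pass frequency dictionary followed by one membership test on its values.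
import Mathlib
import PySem

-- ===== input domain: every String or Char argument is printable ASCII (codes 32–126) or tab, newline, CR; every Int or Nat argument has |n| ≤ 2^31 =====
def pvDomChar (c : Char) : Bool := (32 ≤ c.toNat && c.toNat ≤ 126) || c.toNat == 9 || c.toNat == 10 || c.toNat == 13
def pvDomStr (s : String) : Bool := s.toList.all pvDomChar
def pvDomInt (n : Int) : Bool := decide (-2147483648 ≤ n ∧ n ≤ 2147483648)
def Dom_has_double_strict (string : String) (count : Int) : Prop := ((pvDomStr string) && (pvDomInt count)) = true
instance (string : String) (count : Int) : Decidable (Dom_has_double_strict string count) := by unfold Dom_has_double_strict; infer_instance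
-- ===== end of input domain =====

-- B replaces A's nested full-string rescans with a one-pass frequency dictionary
-- and a membership test on its values (same return value on every input; A is total).

-- ===== PORT A =====
-- for i in string: count i's occurrences with an inner full scan; return True on c == count
def hdsLoopA (s : List Char) (count : Int) : List Char → Bool
  | [] => false
  | i :: rest =>
      if (s.foldl (fun c j => if i == j then c + 1 else c) (0 : Int)) = count then true
      else hdsLoopA s count rest

def has_double_strict (string : String) (count : Int) : Bool :=
  hdsLoopA string.toList count string.toList

-- ===== PORT B =====
-- freq[ch] = freq.get(ch, 0) + 1 over one pass; then 'count in freq.values()'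
def has_double_strict_alt (string : String) (count : Int) : Bool :=
  let freq : PySem.Dict Char Int :=
    string.toList.foldl (fun d ch => d.insert ch (d.getD ch 0 + 1)) PySem.Dict.empty
  freq.values.contains count

-- ===== PRECONDITION & SPEC =====
def Spec_has_double_strict (string : String) (count : Int) (out : Bool) : Prop := out = has_double_strict_alt string count
instance (string : String) (count : Int) (out : Bool) : Decidable (Spec_has_double_strict string count out) := by unfold Spec_has_double_strict; infer_instance

-- ===== CLAIM (what is proved, stated in full; the proofs are below) =====
def Claim_equal_has_double_strict : Prop := ∀ (string : String) (count : Int), Dom_has_double_strict string count → Spec_has_double_strict string count (has_double_strict string count)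

-- ===== LEMMAS AND PROOFS =====
-- A's inner loop is the count of i in s
theorem hds_inner_count (s : List Char) (i : Char) :
    s.foldl (fun c j => if i == j then c + 1 else c) (0 : Int) = (s.count i : Int) := by
  have h : ∀ j ∈ s, ∀ c : Int, (if i == j then c + 1 else c) = (if j == i then c + 1 else c) := by
    intro j _ c
    by_cases h : i = j
    · simp [h]
    · simp only [beq_iff_eq]
      rw [if_neg h, if_neg (fun h' => h h'.symm)]
  rw [PySem.List.foldl_congr_mem' s _ _ _ h, PySem.List.foldl_beq_add_one]
  simp

-- A's outer loop is an existence test over the characters of s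
theorem hdsLoopA_eq_any (s : List Char) (count : Int) (l : List Char) :
    hdsLoopA s count l = l.any (fun i => decide ((s.count i : Int) = count)) := by
  induction l with
  | nil => rfl
  | cons i rest ih =>
      simp only [hdsLoopA, hds_inner_count, List.any_cons, ih]
      by_cases h : (s.count i : Int) = count <;> simp [h]


-- ===== VERDICT (by name: the statement is the Claim_ definition above) =====
theorem has_double_strict_spec : Claim_equal_has_double_strict := by
  intro string count _
  unfold Spec_has_double_strict has_double_strict has_double_strict_alt
  rw [hdsLoopA_eq_any, PySem.Dict.foldl_insert_getD_add_one_eq_counter]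
  set s := string.toList
  have hv : (PySem.Dict.counter s).values
      = (PySem.Set.ofList s).map (fun k => (s.count k : Int)) := by
    have := PySem.Dict.items_counter (xs := s)
    simpa [PySem.Dict.values] using congrArg (List.map Prod.snd) this
  simp only [hv]
  rw [Bool.eq_iff_iff, List.any_eq_true, List.contains_iff_exists_mem_beq]
  simp only [List.mem_map, PySem.Set.mem_ofList, decide_eq_true_eq, beq_iff_eq]
  constructor
  · rintro ⟨i, hi, hc⟩; exact ⟨_, ⟨i, hi, rfl⟩, hc.symm⟩
  · rintro ⟨v, ⟨k, hk, rfl⟩, hv'⟩; exact ⟨k, hk, hv'.symm⟩
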